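-- pv_equiv track=rewrite | github.com/jjjen23/Programmers | 프로그래머스/0/181864. 문자열 바꿔서 찾기/문자열 바꿔서 찾기.py | solution
-- ===== SOURCE A (Python) =====
-- def solution(myString, pat):
--     myString = list(myString)
--     for i in range(len(myString)):
--         if myString[i] == 'A':
--             myString[i] = 'B'
--         elif myString[i] == 'B':
--             myString[i] = 'A'
--
--     if pat in ''.join(myString):
--         return 1
--     else:
--         return 0
-- ===== SOURCE B (Python) =====
-- def solution(myString, pat):
--     # Explicit sliding-window search: compare each window of myString against pat
--     # character by character, applying the A<->B swap on the fly.  No transformed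
--     # string is ever built and no builtin substring test is used.
--     n, m = len(myString), len(pat)
--     for i in range(n - m + 1):
--         j = 0
--         while j < m:
--             c = myString[i + j]
--             s = 'B' if c == 'A' else 'A' if c == 'B' else c
--             if s != pat[j]:
--                 break
--             j += 1
--         if j == m:
--             return 1
--     return 0
-- ===== Notes on version B (the rewrite author's own statement) =====
-- stated objective: alternative
-- what changed: A rebuilds the whole string with A/B swapped and uses the builtin substring test; B never builds a transformed string: it runs an explicit naive sliding-window search, comparing each window character against pat under the A<->B swap applied on the fly.
import Mathlib
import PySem

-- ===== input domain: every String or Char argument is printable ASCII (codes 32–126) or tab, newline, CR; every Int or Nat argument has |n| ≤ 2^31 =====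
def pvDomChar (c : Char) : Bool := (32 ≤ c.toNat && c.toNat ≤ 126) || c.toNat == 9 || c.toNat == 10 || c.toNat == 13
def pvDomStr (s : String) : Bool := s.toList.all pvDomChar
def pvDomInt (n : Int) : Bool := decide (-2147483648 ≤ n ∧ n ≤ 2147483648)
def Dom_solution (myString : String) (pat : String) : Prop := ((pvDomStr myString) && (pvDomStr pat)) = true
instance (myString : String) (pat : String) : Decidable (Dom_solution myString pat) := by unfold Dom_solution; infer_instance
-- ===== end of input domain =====

-- B replaces "rebuild the swapped string, then builtin substring test" by an explicit
-- sliding-window search comparing characters under the A<->B swap on the fly; objective: alternative.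

-- ===== PORT A =====
-- index loop rewriting myString[i]; 0 ≤ i < len so .toNat on the index is exact
def solution (myString : String) (pat : String) : Int :=
  if PySem.Str.isIn pat (String.ofList
      ((PySem.List.pyRange 0 (myString.toList.length : Int) 1).foldl
        (fun l i =>
          if PySem.List.pyGetD l i ' ' == 'A' then l.set i.toNat 'B'
          else if PySem.List.pyGetD l i ' ' == 'B' then l.set i.toNat 'A'
          else l) myString.toList))
  then 1 else 0

-- ===== PORT B =====
-- inner 'while j < m' loop of Source B: advance j while the swapped window char matches pat[j]
def pvWhile (s p : List Char) (i : Int) (m j : Nat) : Nat :=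
  if h : j < m then
    let c := PySem.List.pyGetD s (i + j) ' '
    let sw := if c == 'A' then 'B' else if c == 'B' then 'A' else c
    if sw ≠ PySem.List.pyGetD p (j : Int) ' ' then j
    else pvWhile s p i m (j + 1)
  else j
termination_by m - j

-- outer 'for i in range(n - m + 1)' loop of Source B, with its early 'return 1'
def pvOuter (s p : List Char) (m : Nat) : List Int → Int
  | [] => 0
  | i :: rest => if pvWhile s p i m 0 = m then 1 else pvOuter s p m rest

def solution_alt (myString : String) (pat : String) : Int :=
  pvOuter myString.toList pat.toList pat.toList.length
    (PySem.List.pyRange 0 ((myString.toList.length : Int) - pat.toList.length + 1) 1)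

-- ===== PRECONDITION & SPEC =====
def Spec_solution (myString : String) (pat : String) (out : Int) : Prop := out = solution_alt myString pat
instance (myString : String) (pat : String) (out : Int) : Decidable (Spec_solution myString pat out) := by unfold Spec_solution; infer_instance

-- ===== CLAIM (what is proved, stated in full; the proofs are below) =====
def Claim_equal_solution : Prop := ∀ (myString : String) (pat : String), Dom_solution myString pat → Spec_solution myString pat (solution myString pat)

-- ===== LEMMAS AND PROOFS =====

def pvSwapAB (c : Char) : Char := if c == 'A' then 'B' else if c == 'B' then 'A' else c

-- A's index loop equals mapping the swap over the list (invariant: prefix `done` already processed)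
theorem pvLoop_eq_map (done todo : List Char) :
    (PySem.List.pyRange (done.length : Int) ((done.length : Int) + todo.length) 1).foldl
      (fun l i =>
        if PySem.List.pyGetD l i ' ' == 'A' then l.set i.toNat 'B'
        else if PySem.List.pyGetD l i ' ' == 'B' then l.set i.toNat 'A'
        else l) (done ++ todo) = done ++ todo.map pvSwapAB := by
  induction todo generalizing done with
  | nil => simp [PySem.List.pyRange_one_eq_nil]
  | cons c rest ih =>
    rw [PySem.List.pyRange_one_cons (by push_cast [List.length_cons]; omega)]
    simp only [List.foldl_cons, List.length_cons]
    have hget : PySem.List.pyGetD (done ++ c :: rest) (done.length : Int) ' ' = c := by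
      rw [PySem.List.pyGetD_natCast]
      simp [List.getD_eq_getElem?_getD]
    have hset : ∀ d : Char, (done ++ c :: rest).set ((done.length : Int)).toNat d
        = (done ++ [d]) ++ rest := by
      intro d; simp
    have hstep : ∀ d : Char,
        List.foldl
          (fun l i =>
            if PySem.List.pyGetD l i ' ' == 'A' then l.set i.toNat 'B'
            else if PySem.List.pyGetD l i ' ' == 'B' then l.set i.toNat 'A'
            else l) ((done ++ [d]) ++ rest)
          (PySem.List.pyRange ((done.length : Int) + 1) ((done.length : Int) + ((rest.length + 1 : Nat) : Int)) 1)
        = done ++ (d :: rest.map pvSwapAB) := by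
      intro d
      have h := ih (done ++ [d])
      simp only [List.length_append, List.length_cons, List.length_nil, Nat.zero_add] at h
      rw [show ((done.length : Int) + ((rest.length + 1 : Nat) : Int))
            = ((done.length + 1 : Nat) : Int) + (rest.length : Int) by push_cast; ring,
          show ((done.length : Int) + 1) = ((done.length + 1 : Nat) : Int) by push_cast; ring]
      rw [h, List.append_assoc]; rfl
    rw [hget]
    by_cases h1 : c = 'A'
    · subst h1
      rw [if_pos (by decide), hset, hstep]
      simp [pvSwapAB]
    · by_cases h2 : c = 'B'
      · subst h2
        rw [if_neg (by decide), if_pos (by decide), hset, hstep]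
        simp [pvSwapAB]
      · rw [if_neg (by simp [h1]), if_neg (by simp [h2]),
            show done ++ c :: rest = done ++ [c] ++ rest by simp, hstep]
        simp [pvSwapAB, h1, h2]

-- the inner while loop reaches m iff every remaining position matches under the swap
theorem pvWhile_eq_m_iff (s p : List Char) (i : Int) (m : Nat) :
    ∀ j, j ≤ m →
      (pvWhile s p i m j = m ↔
        ∀ k, j ≤ k → k < m →
          pvSwapAB (PySem.List.pyGetD s (i + k) ' ') = PySem.List.pyGetD p (k : Int) ' ') := by
  intro j hj
  induction hd : m - j generalizing j with
  | zero =>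
    have hjm : j = m := by omega
    subst hjm
    rw [pvWhile]
    simp
    intro k h1 h2; omega
  | succ d ih =>
    have hjm : j < m := by omega
    rw [pvWhile]
    rw [dif_pos hjm]
    simp only
    by_cases hmatch : pvSwapAB (PySem.List.pyGetD s (i + j) ' ') = PySem.List.pyGetD p (j : Int) ' '
    · rw [if_neg (by unfold pvSwapAB at hmatch; simp only [not_not]; exact hmatch)]
      rw [ih (j + 1) (by omega) (by omega)]
      constructor
      · intro h k hk1 hk2
        rcases Nat.eq_or_lt_of_le hk1 with rfl | hlt
        · exact hmatch
        · exact h k hlt hk2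
      · intro h k hk1 hk2; exact h k (by omega) hk2
    · rw [if_pos (by unfold pvSwapAB at hmatch; exact hmatch)]
      constructor
      · intro h; omega
      · intro h; exact absurd (h j le_rfl hjm) hmatch

-- the outer loop returns 1 iff some start index makes the inner loop reach m, else 0
theorem pvOuter_eq_one_iff (s p : List Char) (m : Nat) (l : List Int) :
    pvOuter s p m l = (if ∃ i ∈ l, pvWhile s p i m 0 = m then 1 else 0) := by
  induction l with
  | nil => simp [pvOuter]
  | cons i rest ih =>
    rw [pvOuter, ih]
    by_cases h : pvWhile s p i m 0 = m
    · simp [h]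
    · by_cases h2 : ∃ x ∈ rest, pvWhile s p x m 0 = m
      · simp [h, h2]
      · simp [h, h2]

-- a window match at Nat index j is exactly 'p is a prefix of (map swap s).drop j'
theorem pvWindow_iff_prefix (s p : List Char) (j : Nat) (hjm : j + p.length ≤ s.length) :
    (∀ k, k < p.length →
        pvSwapAB (PySem.List.pyGetD s ((j : Int) + k) ' ') = PySem.List.pyGetD p (k : Int) ' ')
      ↔ p <+: (s.map pvSwapAB).drop j := by
  rw [List.prefix_iff_eq_take]
  constructor
  · intro h
    apply List.ext_getElem
    · simp; omega
    · intro k hk1 hk2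
      have hkp : k < p.length := hk1
      have hjk : j + k < s.length := by omega
      have := h k hkp
      rw [show (j : Int) + (k : Int) = ((j + k : Nat) : Int) by push_cast; ring,
          PySem.List.pyGetD_natCast, PySem.List.pyGetD_natCast] at this
      rw [List.getD_eq_getElem _ _ hjk, List.getD_eq_getElem _ _ hkp] at this
      simp [List.getElem_take, List.getElem_drop, this]
  · intro h k hk
    have hjk : j + k < s.length := by omega
    have hpk := List.getElem_of_eq h hk
    rw [show (j : Int) + (k : Int) = ((j + k : Nat) : Int) by push_cast; ring,
        PySem.List.pyGetD_natCast, PySem.List.pyGetD_natCast,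
        List.getD_eq_getElem _ _ hjk, List.getD_eq_getElem _ _ hk]
    rw [hpk]
    simp [List.getElem_take, List.getElem_drop]

-- existence of a prefix-drop position is equivalent to a bounded one
theorem pvExists_bounded (s p : List Char) :
    (∃ j : Nat, p <+: (s.map pvSwapAB).drop j)
      ↔ (∃ j : Nat, j + p.length ≤ s.length ∧ p <+: (s.map pvSwapAB).drop j) := by
  constructor
  · rintro ⟨j, hj⟩
    have hlen := hj.length_le
    simp at hlen
    by_cases hjs : j ≤ s.length
    · exact ⟨j, by omega, hj⟩
    · have : (s.map pvSwapAB).drop j = [] := by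
        apply List.drop_eq_nil_of_le; simp; omega
      rw [this] at hj
      have := List.prefix_nil.mp hj
      subst this
      exact ⟨0, by simp, by simp⟩
  · rintro ⟨j, _, hj⟩; exact ⟨j, hj⟩

-- ===== VERDICT (by name: the statement is the Claim_ definition above) =====
theorem solution_spec : Claim_equal_solution := by
  intro myString pat _
  unfold Spec_solution solution solution_alt
  have hloop := pvLoop_eq_map [] myString.toList
  simp only [List.length_nil, Nat.cast_zero, List.nil_append, zero_add] at hloop
  rw [hloop]
  set s := myString.toList with hs
  set p := pat.toList with hp
  set n := s.length with hn
  set m := p.length with hm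
  rw [pvOuter_eq_one_iff]
  have hiff : PySem.Str.isIn pat (String.ofList (s.map pvSwapAB)) = true
      ↔ ∃ i ∈ PySem.List.pyRange 0 ((n : Int) - m + 1) 1, pvWhile s p i m 0 = m := by
    rw [PySem.Str.isIn_iff_infix]
    simp only [String.toList_ofList, ← hp]
    rw [List.infix_iff_prefix_suffix]
    constructor
    · rintro ⟨t, hpre, hsuf⟩
      obtain ⟨u, hu⟩ := hsuf
      have hdrop : ∃ j : Nat, p <+: (s.map pvSwapAB).drop j := by
        refine ⟨u.length, ?_⟩
        have : (s.map pvSwapAB).drop u.length = t := by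
          rw [← hu]; simp
        rw [this]; exact hpre
      obtain ⟨j, hjb, hj⟩ := (pvExists_bounded s p).mp hdrop
      refine ⟨(j : Int), ?_, ?_⟩
      · rw [PySem.List.mem_pyRange_one]
        constructor
        · positivity
        · omega
      · rw [pvWhile_eq_m_iff s p (j : Int) m 0 (Nat.zero_le m)]
        intro k _ hk
        exact (pvWindow_iff_prefix s p j hjb).mpr hj k hk
    · rintro ⟨i, hmem, hwin⟩
      rw [PySem.List.mem_pyRange_one] at hmem
      obtain ⟨hi0, hi1⟩ := hmem
      obtain ⟨j, rfl⟩ := Int.eq_ofNat_of_zero_le hi0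
      have hjb : j + m ≤ n := by omega
      rw [pvWhile_eq_m_iff s p (j : Int) m 0 (Nat.zero_le m)] at hwin
      have hpre : p <+: (s.map pvSwapAB).drop j :=
        (pvWindow_iff_prefix s p j hjb).mp (fun k hk => hwin k (Nat.zero_le k) hk)
      refine ⟨(s.map pvSwapAB).drop j, hpre, ?_⟩
      exact ⟨(s.map pvSwapAB).take j, by simp⟩
  by_cases h : PySem.Str.isIn pat (String.ofList (s.map pvSwapAB)) = true
  · rw [if_pos h, if_pos (hiff.mp h)]
  · rw [if_neg h, if_neg (fun he => h (hiff.mpr he))]
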